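-- pv_equiv track=rewrite | github.com/tjresearch/research-jack_mallek | 15puzzle.py | get_closest_pairs
-- ===== SOURCE A (Python) =====
-- def get_closest_pairs(set1, set2):
--     minimum = 10000
--     pair = None
--     tile_to_index = {'0':0, "A":1, 'B':2, 'C':3, 'D':4,'E':5,'F':6,'G':7,"H":8,'I':9,'J':10,'K':11,'L':12,'M':13,'N':14,'O':15}
--
--     pairs = set()
--     for x1 in set1:
--         for x2 in set2:
--             distance = abs(tile_to_index[x1]%4 - tile_to_index[x2]%4) + abs(int(tile_to_index[x1]/4) - int(tile_to_index[x2]/4))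
--             if distance == 0:
--                 continue
--             if distance<minimum:
--                 minimum = distance
--                 pairs = set()
--             if distance == minimum:
--                 pairs.add((x1,x2))
--     return pairs
-- ===== SOURCE B (Python) =====
-- def get_closest_pairs(set1, set2):
--     tile_to_index = {'0':0, "A":1, 'B':2, 'C':3, 'D':4,'E':5,'F':6,'G':7,"H":8,'I':9,'J':10,'K':11,'L':12,'M':13,'N':14,'O':15}
--
--     def dist(x1, x2):
--         i, j = tile_to_index[x1], tile_to_index[x2]
--         return abs(i % 4 - j % 4) + abs(i // 4 - j // 4)
--
--     cands = [((x1, x2), d)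
--              for x1 in set1
--              for x2 in set2
--              for d in [dist(x1, x2)]
--              if d != 0]
--     if not cands:
--         return set()
--     m = min(d for _, d in cands)
--     return {p for p, d in cands if d == m}
-- ===== Notes on version B (the rewrite author's own statement) =====
-- stated objective: simpler
-- what changed: Replaced A's single nested scan with a running minimum that resets the accumulated pair set whenever a smaller distance appears by a two-pass shape: build the list of nonzero cross-pair Manhattan distances once, take its minimum, then collect the pairs achieving it (empty set if there are none).
import Mathlib
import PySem

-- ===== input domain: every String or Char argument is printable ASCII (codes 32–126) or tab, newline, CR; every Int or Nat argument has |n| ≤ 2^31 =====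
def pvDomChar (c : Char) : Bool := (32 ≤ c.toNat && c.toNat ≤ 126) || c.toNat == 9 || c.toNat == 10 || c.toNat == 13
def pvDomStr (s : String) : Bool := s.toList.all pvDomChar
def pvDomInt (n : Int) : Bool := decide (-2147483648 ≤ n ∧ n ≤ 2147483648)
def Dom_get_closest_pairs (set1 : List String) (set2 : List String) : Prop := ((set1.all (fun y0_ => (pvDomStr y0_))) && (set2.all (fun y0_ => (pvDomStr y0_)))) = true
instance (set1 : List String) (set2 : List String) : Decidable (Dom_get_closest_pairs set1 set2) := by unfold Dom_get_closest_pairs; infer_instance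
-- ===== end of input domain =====

-- B replaces A's single running-minimum-with-reset scan by a two-pass min-then-filter over the list
-- of nonzero cross-pair distances (objective: simpler decomposition, same cost).
-- The result is a Python set (order-insensitive); neither version mutates its arguments.

-- ===== PORT A =====
-- tile_to_index literal of A
def pvTileA : PySem.Dict String Int :=
  PySem.Dict.ofList [("0",0),("A",1),("B",2),("C",3),("D",4),("E",5),("F",6),("G",7),
                     ("H",8),("I",9),("J",10),("K",11),("L",12),("M",13),("N",14),("O",15)]

-- tile_to_index[x]: under Pre_ the key is present, so the getD 0 fallback is never taken
def pvIdxA (x : String) : Int := (pvTileA.get? x).getD 0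

def get_closest_pairs (set1 : List String) (set2 : List String) : List (String × String) :=
  -- minimum = 10000; pairs = set(); nested for-loops with running minimum and reset-on-new-minimum
  let r := set1.foldl (fun st x1 =>
    set2.foldl (fun (st : Int × PySem.Set (String × String)) x2 =>
      -- int(t/4) is exact as truncdiv (the operands are small ints)
      let distance := |PySem.Int.mod (pvIdxA x1) 4 - PySem.Int.mod (pvIdxA x2) 4| +
                      |PySem.Int.truncdiv (pvIdxA x1) 4 - PySem.Int.truncdiv (pvIdxA x2) 4|
      if distance = 0 then st
      else
        let minimum' := if distance < st.1 then distance else st.1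
        let pairs' := if distance < st.1 then PySem.Set.empty else st.2
        if distance = minimum' then (minimum', PySem.Set.add pairs' (x1, x2))
        else (minimum', pairs')) st)
    ((10000 : Int), (PySem.Set.empty : PySem.Set (String × String)))
  r.2

-- ===== PORT B =====
-- tile_to_index literal of B
def pvTileB : PySem.Dict String Int :=
  PySem.Dict.ofList [("0",0),("A",1),("B",2),("C",3),("D",4),("E",5),("F",6),("G",7),
                     ("H",8),("I",9),("J",10),("K",11),("L",12),("M",13),("N",14),("O",15)]

-- B's dist helper (i, j inlined); under Pre_ the keys are present, so the getD 0 fallback is never taken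
def pvDistB (x1 x2 : String) : Int :=
  |PySem.Int.mod ((pvTileB.get? x1).getD 0) 4 - PySem.Int.mod ((pvTileB.get? x2).getD 0) 4| +
  |PySem.Int.floordiv ((pvTileB.get? x1).getD 0) 4 - PySem.Int.floordiv ((pvTileB.get? x2).getD 0) 4|

def get_closest_pairs_alt (set1 : List String) (set2 : List String) : List (String × String) :=
  let cands := set1.flatMap (fun x1 => set2.filterMap (fun x2 =>
    if pvDistB x1 x2 ≠ 0 then some ((x1, x2), pvDistB x1 x2) else none))
  match cands with
  | [] => PySem.Set.empty
  | c :: rest =>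
    let m := rest.foldl (fun acc p => min acc p.2) c.2
    PySem.Set.ofList ((cands.filter (fun p => p.2 == m)).map (·.1))

-- ===== PRECONDITION & SPEC =====
def pvTileKeys : List String :=
  ["0","A","B","C","D","E","F","G","H","I","J","K","L","M","N","O"]

-- A raises KeyError exactly when both lists are nonempty and some element is not a tile name; Pre_ excludes that.
def Pre_get_closest_pairs (set1 : List String) (set2 : List String) : Prop :=
  set1 = [] ∨ set2 = [] ∨ ((∀ x ∈ set1, x ∈ pvTileKeys) ∧ (∀ x ∈ set2, x ∈ pvTileKeys))
instance (set1 : List String) (set2 : List String) : Decidable (Pre_get_closest_pairs set1 set2) := by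
  unfold Pre_get_closest_pairs; infer_instance

def pvWitness_get_closest_pairs : List String × List String := (["A", "F"], ["0", "B"])

def Spec_get_closest_pairs (set1 : List String) (set2 : List String) (out : List (String × String)) : Prop := out = get_closest_pairs_alt set1 set2
instance (set1 : List String) (set2 : List String) (out : List (String × String)) : Decidable (Spec_get_closest_pairs set1 set2 out) := by unfold Spec_get_closest_pairs; infer_instance

-- ===== CLAIM (what is proved, stated in full; the proofs are below) =====
def Claim_equal_get_closest_pairs : Prop := ∀ (set1 : List String) (set2 : List String), Dom_get_closest_pairs set1 set2 → Pre_get_closest_pairs set1 set2 → Spec_get_closest_pairs set1 set2 (get_closest_pairs set1 set2)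

-- ===== LEMMAS AND PROOFS =====

-- the tile index is always in [0, 15] (also through the getD 0 fallback)
theorem pvIdx_bounds (x : String) : 0 ≤ pvIdxA x ∧ pvIdxA x ≤ 15 := by
  unfold pvIdxA
  rcases h : pvTileA.get? x with _ | v
  · simp
  · have hm := PySem.Dict.mem_items_of_get?_eq_some pvTileA h
    have hit : pvTileA.items = [("0",(0:Int)),("A",1),("B",2),("C",3),("D",4),("E",5),("F",6),("G",7),
                     ("H",8),("I",9),("J",10),("K",11),("L",12),("M",13),("N",14),("O",15)] := by decide
    rw [hit] at hm
    simp only [List.mem_cons, List.not_mem_nil, or_false, Prod.mk.injEq] at hm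
    rcases hm with ⟨_,h⟩|⟨_,h⟩|⟨_,h⟩|⟨_,h⟩|⟨_,h⟩|⟨_,h⟩|⟨_,h⟩|⟨_,h⟩|⟨_,h⟩|⟨_,h⟩|⟨_,h⟩|⟨_,h⟩|⟨_,h⟩|⟨_,h⟩|⟨_,h⟩|⟨_,h⟩ <;>
      subst h <;> simp

-- B's distance is the expression A computes …
theorem distB_eq (x1 x2 : String) :
    pvDistB x1 x2 =
      |PySem.Int.mod (pvIdxA x1) 4 - PySem.Int.mod (pvIdxA x2) 4| +
      |PySem.Int.truncdiv (pvIdxA x1) 4 - PySem.Int.truncdiv (pvIdxA x2) 4| := by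
  have h1 := pvIdx_bounds x1
  have h2 := pvIdx_bounds x2
  have e : pvTileB = pvTileA := by decide
  unfold pvDistB
  rw [e]
  have hf : ∀ a : Int, 0 ≤ a → PySem.Int.floordiv a 4 = PySem.Int.truncdiv a 4 := by
    intro a ha
    rw [PySem.Int.floordiv_eq_ediv_of_pos (by norm_num)]
    unfold PySem.Int.truncdiv
    rw [Int.tdiv_eq_ediv_of_nonneg ha]
  show |_ - _| + |PySem.Int.floordiv (pvIdxA x1) 4 - PySem.Int.floordiv (pvIdxA x2) 4| = _
  rw [hf _ h1.1, hf _ h2.1]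
  rfl

-- … and it lies in [0, 6]
theorem distB_bounds (x1 x2 : String) : 0 ≤ pvDistB x1 x2 ∧ pvDistB x1 x2 ≤ 6 := by
  have h1 := pvIdx_bounds x1
  have h2 := pvIdx_bounds x2
  have e : pvTileB = pvTileA := by decide
  unfold pvDistB
  rw [e]
  show 0 ≤ |PySem.Int.mod (pvIdxA x1) 4 - PySem.Int.mod (pvIdxA x2) 4| +
        |PySem.Int.floordiv (pvIdxA x1) 4 - PySem.Int.floordiv (pvIdxA x2) 4| ∧
      |PySem.Int.mod (pvIdxA x1) 4 - PySem.Int.mod (pvIdxA x2) 4| +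
        |PySem.Int.floordiv (pvIdxA x1) 4 - PySem.Int.floordiv (pvIdxA x2) 4| ≤ 6
  have m1 := PySem.Int.mod_nonneg (pvIdxA x1) (b := 4) (by norm_num)
  have m2 := PySem.Int.mod_nonneg (pvIdxA x2) (b := 4) (by norm_num)
  have l1 := PySem.Int.mod_lt (pvIdxA x1) (b := 4) (by norm_num)
  have l2 := PySem.Int.mod_lt (pvIdxA x2) (b := 4) (by norm_num)
  rw [PySem.Int.floordiv_eq_ediv_of_pos (by norm_num), PySem.Int.floordiv_eq_ediv_of_pos (by norm_num)]
  have d1 : 0 ≤ pvIdxA x1 / 4 ∧ pvIdxA x1 / 4 ≤ 3 := by omega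
  have d2 : 0 ≤ pvIdxA x2 / 4 ∧ pvIdxA x2 / 4 ≤ 3 := by omega
  constructor
  · positivity
  · have a1 : |PySem.Int.mod (pvIdxA x1) 4 - PySem.Int.mod (pvIdxA x2) 4| ≤ 3 := abs_le.mpr (by omega)
    have a2 : |pvIdxA x1 / 4 - pvIdxA x2 / 4| ≤ 3 := abs_le.mpr (by omega)
    omega

-- A's loop body as a step over cross pairs
def pvStep (st : Int × PySem.Set (String × String)) (p : String × String) :
    Int × PySem.Set (String × String) :=
  if pvDistB p.1 p.2 = 0 then st
  else
    let minimum' := if pvDistB p.1 p.2 < st.1 then pvDistB p.1 p.2 else st.1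
    let pairs' := if pvDistB p.1 p.2 < st.1 then PySem.Set.empty else st.2
    if pvDistB p.1 p.2 = minimum' then (minimum', PySem.Set.add pairs' p)
    else (minimum', pairs')

def pvPairs (set1 set2 : List String) : List (String × String) :=
  set1.flatMap (fun x1 => set2.map (fun x2 => (x1, x2)))

def pvMin (m : Int) (l : List (String × String)) : Int :=
  l.foldl (fun m p => if pvDistB p.1 p.2 ≠ 0 ∧ pvDistB p.1 p.2 < m then pvDistB p.1 p.2 else m) m

theorem pvMin_le (l : List (String × String)) : ∀ m : Int, pvMin m l ≤ m := by
  induction l with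
  | nil => intro m; simp [pvMin]
  | cons p t ih =>
    intro m
    show pvMin (if _ then _ else _) t ≤ m
    split
    · exact le_trans (ih _) (by omega)
    · exact ih m

theorem A_eq_foldl (set1 set2 : List String) :
    get_closest_pairs set1 set2 = ((pvPairs set1 set2).foldl pvStep (10000, PySem.Set.empty)).2 := by
  unfold get_closest_pairs pvPairs
  rw [List.foldl_flatMap]
  simp only [List.foldl_map]
  congr 2
  funext st x1
  congr 1
  funext st x2
  simp only [pvStep, ← distB_eq]

-- the invariant of A's running-minimum loop: min so far, plus all minimal pairs seen since the last reset
theorem foldl_pvStep (l : List (String × String)) :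
    ∀ (m : Int) (ps : PySem.Set (String × String)),
      l.foldl pvStep (m, ps) =
        (pvMin m l,
         (l.filter (fun p => pvDistB p.1 p.2 != 0 && pvDistB p.1 p.2 == pvMin m l)).foldl
           PySem.Set.add (if pvMin m l < m then PySem.Set.empty else ps)) := by
  induction l with
  | nil => intro m ps; simp [pvMin]
  | cons p t ih =>
    intro m ps
    have hMt := pvMin_le t
    rw [List.foldl_cons, List.filter_cons]
    by_cases h0 : pvDistB p.1 p.2 = 0
    · have e1 : pvStep (m, ps) p = (m, ps) := by simp [pvStep, h0]
      have e2 : pvMin m (p :: t) = pvMin m t := by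
        show pvMin (if pvDistB p.1 p.2 ≠ 0 ∧ pvDistB p.1 p.2 < m then pvDistB p.1 p.2 else m) t =
          pvMin m t
        rw [if_neg (by simp [h0])]
      rw [e1, e2, ih m ps]
      simp [h0]
    · by_cases hlt : pvDistB p.1 p.2 < m
      · have e1 : pvStep (m, ps) p = (pvDistB p.1 p.2, PySem.Set.add PySem.Set.empty p) := by
          simp [pvStep, h0, hlt]
        have e2 : pvMin m (p :: t) = pvMin (pvDistB p.1 p.2) t := by
          show pvMin (if pvDistB p.1 p.2 ≠ 0 ∧ pvDistB p.1 p.2 < m then pvDistB p.1 p.2 else m) t = _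
          rw [if_pos ⟨h0, hlt⟩]
        rw [e1, ih _ _, e2]
        have hle := hMt (pvDistB p.1 p.2)
        rw [if_pos (show pvMin (pvDistB p.1 p.2) t < m by omega)]
        by_cases he : pvMin (pvDistB p.1 p.2) t = pvDistB p.1 p.2
        · rw [if_neg (by omega)]
          simp [h0, he]
        · rw [if_pos (by omega)]
          have hne : ¬ (pvDistB p.1 p.2 = pvMin (pvDistB p.1 p.2) t) := fun h => he h.symm
          simp [hne]
      · have e2 : pvMin m (p :: t) = pvMin m t := by
          show pvMin (if pvDistB p.1 p.2 ≠ 0 ∧ pvDistB p.1 p.2 < m then pvDistB p.1 p.2 else m) t =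
            pvMin m t
          rw [if_neg (fun h => hlt h.2)]
        by_cases heq : pvDistB p.1 p.2 = m
        · have hm0 : ¬ (m = 0) := heq ▸ h0
          have e1 : pvStep (m, ps) p = (m, PySem.Set.add ps p) := by
            simp [pvStep, heq, hm0]
          rw [e1, ih _ _, e2]
          by_cases hlt2 : pvMin m t < m
          · rw [if_pos hlt2, if_pos hlt2]
            have hne : ¬ (pvDistB p.1 p.2 = pvMin m t) := by omega
            simp [hne]
          · have hM : pvMin m t = m := le_antisymm (hMt m) (by omega)
            rw [if_neg hlt2, if_neg hlt2]
            simp [heq, hM, hm0]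
        · have e1 : pvStep (m, ps) p = (m, ps) := by
            simp [pvStep, h0, hlt, heq]
          rw [e1, ih _ _, e2]
          have hne : ¬ (pvDistB p.1 p.2 = pvMin m t) := by
            have := hMt m; omega
          simp [hne]

theorem cands_eq (set1 set2 : List String) :
    (set1.flatMap (fun x1 => set2.filterMap (fun x2 =>
        if pvDistB x1 x2 ≠ 0 then some ((x1, x2), pvDistB x1 x2) else none))) =
      (pvPairs set1 set2).filterMap
        (fun p => if pvDistB p.1 p.2 ≠ 0 then some (p, pvDistB p.1 p.2) else none) := by
  unfold pvPairs
  rw [List.filterMap_flatMap]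
  simp only [List.filterMap_map, Function.comp]

theorem pvMin_eq_foldl_min (l : List (String × String)) :
    ∀ m : Int,
      pvMin m l =
        ((l.filterMap (fun p => if pvDistB p.1 p.2 ≠ 0 then some (p, pvDistB p.1 p.2) else none)).map
            (·.2)).foldl min m := by
  induction l with
  | nil => intro m; rfl
  | cons p t ih =>
    intro m
    by_cases h0 : pvDistB p.1 p.2 = 0
    · show pvMin (if pvDistB p.1 p.2 ≠ 0 ∧ pvDistB p.1 p.2 < m then pvDistB p.1 p.2 else m) t = _
      rw [if_neg (by simp [h0])]
      simpa [List.filterMap_cons, h0] using ih m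
    · have e : (if pvDistB p.1 p.2 ≠ 0 ∧ pvDistB p.1 p.2 < m then pvDistB p.1 p.2 else m) =
          min m (pvDistB p.1 p.2) := by
        split_ifs with h <;> omega
      show pvMin (if pvDistB p.1 p.2 ≠ 0 ∧ pvDistB p.1 p.2 < m then pvDistB p.1 p.2 else m) t = _
      rw [e]
      simpa [List.filterMap_cons, h0] using ih (min m (pvDistB p.1 p.2))

theorem filter_cands_eq (l : List (String × String)) (M : Int) :
    ((l.filterMap (fun p => if pvDistB p.1 p.2 ≠ 0 then some (p, pvDistB p.1 p.2) else none)).filter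
        (fun c => c.2 == M)).map (·.1) =
      l.filter (fun p => pvDistB p.1 p.2 != 0 && pvDistB p.1 p.2 == M) := by
  induction l with
  | nil => rfl
  | cons p t ih =>
    by_cases h : pvDistB p.1 p.2 = 0
    · simpa [List.filterMap_cons, List.filter_cons, h] using ih
    · by_cases hM : pvDistB p.1 p.2 = M
      · have h' : ¬ (M = 0) := hM ▸ h
        simpa [List.filterMap_cons, List.filter_cons, h, h', hM] using ih
      · simpa [List.filterMap_cons, List.filter_cons, h, hM] using ih

-- ===== VERDICT (by name: the statement is the Claim_ definition above) =====
theorem get_closest_pairs_spec : Claim_equal_get_closest_pairs := by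
  intro set1 set2 _ _
  show get_closest_pairs set1 set2 = get_closest_pairs_alt set1 set2
  rw [A_eq_foldl, foldl_pvStep]
  unfold get_closest_pairs_alt
  rw [cands_eq]
  rcases hc : (pvPairs set1 set2).filterMap
      (fun p => if pvDistB p.1 p.2 ≠ 0 then some (p, pvDistB p.1 p.2) else none) with _ | ⟨c, rest⟩
  · rw [hc]
    have hall : ∀ p ∈ pvPairs set1 set2, pvDistB p.1 p.2 = 0 := by
      intro p hp
      by_contra hne
      have hmem : (p, pvDistB p.1 p.2) ∈ (pvPairs set1 set2).filterMap
          (fun p => if pvDistB p.1 p.2 ≠ 0 then some (p, pvDistB p.1 p.2) else none) :=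
        List.mem_filterMap.mpr ⟨p, hp, by simp [hne]⟩
      rw [hc] at hmem
      exact absurd hmem (List.not_mem_nil)
    have hfil : (pvPairs set1 set2).filter
        (fun p => pvDistB p.1 p.2 != 0 && pvDistB p.1 p.2 == pvMin 10000 (pvPairs set1 set2)) = [] :=
      List.filter_eq_nil_iff.mpr (fun p hp => by simp [hall p hp])
    rw [hfil]
    simp
  · rw [hc]
    have hcmem : c ∈ (pvPairs set1 set2).filterMap
        (fun p => if pvDistB p.1 p.2 ≠ 0 then some (p, pvDistB p.1 p.2) else none) := by
      rw [hc]; exact List.mem_cons_self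
    obtain ⟨p, hp, hgp⟩ := List.mem_filterMap.mp hcmem
    by_cases hz : pvDistB p.1 p.2 = 0
    · rw [if_neg (by simp [hz])] at hgp
      exact absurd hgp (by simp)
    · rw [if_pos hz] at hgp
      have hceq : c = (p, pvDistB p.1 p.2) := (Option.some_inj.mp hgp).symm
      have hb := distB_bounds p.1 p.2
      have hc2 : c.2 = pvDistB p.1 p.2 := by rw [hceq]
      have hm : rest.foldl (fun acc p => min acc p.2) c.2 = pvMin 10000 (pvPairs set1 set2) := by
        rw [pvMin_eq_foldl_min, hc, List.map_cons, List.foldl_cons,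
          min_eq_right (by omega : c.2 ≤ (10000 : Int)), List.foldl_map]
      show _ = PySem.Set.ofList (((c :: rest).filter
          (fun q => q.2 == rest.foldl (fun acc p => min acc p.2) c.2)).map (fun x => x.1))
      rw [hm, ← hc, filter_cands_eq, PySem.Set.ofList_eq_foldl]
      show List.foldl PySem.Set.add (if _ then PySem.Set.empty else PySem.Set.empty) _ = _
      rw [ite_self]
      rfl
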